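-- pv_equiv track=rewrite | github.com/kyrie-eleison/codingTestStudy | ch11 Greedy/6.py | solution
-- ===== SOURCE A (Python) =====
-- def solution(food_times, k):
--
--     #이분탐색을 이용하여 풀이
--     #round_num번 돌면서 먹은 음식의 양이 k보다 작을 때, 그 중 가장 큰 round_num을 구한다
--     start, end = 0, max(food_times)
--     while True:
--         if start > end:
--             round_num = end
--             break
--
--         mid = (start + end)//2
--         left = 0
--         for food in food_times:
--             if food <= mid:
--                 left += food
--             else:
--                 left += mid
--
--         if left == k:
--             round_num = mid
--             break
--         elif left < k:
--             start = mid + 1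
--         else:
--             end = mid - 1
--
--     #round_num번 회전할 동안 먹은 음식의 양(=지난시간)을 구함
--     left_time = 0
--     for food in food_times:
--         if food <= round_num:
--             left_time += food
--         else:
--             left_time += round_num
--
--     #round_num번 도는 동안 남은 음식들을 체크해가면서 하나씩 먹어가면서, 최초로 k를 넘는 index 구하기
--     for i in range(len(food_times)):
--         food = food_times[i]
--         if food > round_num:
--             left_time += 1
--
--         if left_time > k:
--             return i+1
--
--     return -1
-- ===== SOURCE B (Python) =====
-- def solution(food_times, k):
--     # Level sweep: process foods in increasing order of size; between consecutive
--     # levels the total time eaten grows linearly in the number of foods still left.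
--     pending = sorted(food_times)
--     n = len(pending)
--     prev = 0
--     left = k
--     i = 0
--     while i < n:
--         t = pending[i]
--         cnt = n - i
--         spend = (t - prev) * cnt
--         if spend <= left:
--             left -= spend
--             prev = t
--             while i < n and pending[i] == t:
--                 i += 1
--         else:
--             q, pos = divmod(left, cnt)
--             r = prev + q
--             survivors = [j for j, x in enumerate(food_times) if x > r]
--             return survivors[pos] + 1
--     return -1
-- ===== Notes on version B (the rewrite author's own statement) =====
-- stated objective: faster
-- what changed: Replaces A's binary search over the number of full rounds (each probe re-summing the whole list) by one sort of the food times and a single sweep over distinct eaten-levels that locates the stopping level arithmetically and indexes the surviving food directly; Pre_ excludes only the empty list, on which A's max() raises ValueError.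
-- intended difference: On inputs with at least two foods and k < sum(min(x,-1)) (reachable only with negative k or negative food times), A's binary search clamps its round counter at -1 and always returns 1, while B returns the index of the food at the true stopping position; B's uniform rule is the intended extension of the eating semantics (the region is empty on ordinary inputs). — e.g. on solution([1, 1], -3): A returns 1, B returns 2
import Mathlib
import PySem

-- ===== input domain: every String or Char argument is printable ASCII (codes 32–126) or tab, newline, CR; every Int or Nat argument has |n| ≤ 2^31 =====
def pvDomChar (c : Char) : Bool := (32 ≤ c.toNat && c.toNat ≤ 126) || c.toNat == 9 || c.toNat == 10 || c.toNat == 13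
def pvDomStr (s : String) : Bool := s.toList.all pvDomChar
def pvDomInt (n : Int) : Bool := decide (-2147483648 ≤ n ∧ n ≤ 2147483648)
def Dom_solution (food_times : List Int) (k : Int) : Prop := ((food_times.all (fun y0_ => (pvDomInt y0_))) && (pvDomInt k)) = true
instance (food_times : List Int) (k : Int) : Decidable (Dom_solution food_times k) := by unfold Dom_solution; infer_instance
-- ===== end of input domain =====

-- B replaces A's binary search over rounds (a full-list sum per probe) by one sort and a single sweep over eaten-levels; equal to A outside the stated corner D_ (k below the round(-1) level, reachable only with negative inputs), where A always returns 1.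


-- ===== PORT A =====
-- A's inner loop "left = 0; for food in food_times: if food <= mid: left += food else: left += mid"
def eatSum (food_times : List Int) (m : Int) : Int :=
  food_times.foldl (fun left food => if food ≤ m then left + food else left + m) 0

-- A's "while True" binary search (start, end); returns round_num
def bsearchA (food_times : List Int) (k start end_ : Int) : Int :=
  if h : start > end_ then end_
  else
    let mid := PySem.Int.floordiv (start + end_) 2
    let left := eatSum food_times mid
    if left = k then mid
    else if left < k then bsearchA food_times k (mid + 1) end_
    else bsearchA food_times k start (mid - 1)
termination_by (end_ + 1 - start).toNat
decreasing_by
  · have := PySem.Int.floordiv_two_mid_bounds (le_of_not_gt h)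
    omega
  · have := PySem.Int.floordiv_two_mid_bounds (le_of_not_gt h)
    omega

-- A's final loop "for i in range(len(food_times)): food = food_times[i]; ..."
def scanA (k r : Int) : List Int → Int → Int → Int
  | [], _, _ => -1
  | food :: rest, left_time, i =>
    let lt := if food > r then left_time + 1 else left_time
    if lt > k then i + 1 else scanA k r rest lt (i + 1)

def solution (food_times : List Int) (k : Int) : Int :=
  -- max(food_times): raises on []; Pre_ excludes the empty list (getD 0 is never read under Pre_)
  let mx := (PySem.List.max? food_times (fun x => x)).getD 0
  let round_num := bsearchA food_times k 0 mx
  let left_time := eatSum food_times round_num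
  scanA k round_num food_times left_time 0

-- ===== PORT B =====
-- B's "while i < n:" sweep over the sorted list, carried as the suffix pending[i:];
-- the inner "while i < n and pending[i] == t: i += 1" duplicate skip is the dropWhile;
-- returns none when everything is consumed, some (r, pos) at the level where time runs out
def sweepB (k : Int) : List Int → Int → Int → Option (Int × Int)
  | [], _, _ => none
  | t :: rest', prev, left =>
    let cnt : Int := ((t :: rest').length : Int)
    let spend := (t - prev) * cnt
    if spend ≤ left then
      sweepB k ((t :: rest').dropWhile (fun x => decide (x = t))) t (left - spend)
    else
      some (prev + PySem.Int.floordiv left cnt, PySem.Int.mod left cnt)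
termination_by rest => rest.length
decreasing_by
  rw [List.dropWhile_cons_of_pos (by simp)]
  exact Nat.lt_succ_of_le (List.length_dropWhile_le _ _)

def solution_alt (food_times : List Int) (k : Int) : Int :=
  match sweepB k (PySem.List.sorted food_times (fun x => x)) 0 k with
  | none => -1
  | some (r, pos) =>
    -- "survivors = [j for j, x in enumerate(food_times) if x > r]; return survivors[pos] + 1"
    let survivors := ((PySem.List.enumerate food_times 0).filter (fun p => decide (r < p.2))).map (fun p => p.1)
    (PySem.List.pyGet? survivors pos).getD 0 + 1

-- ===== PRECONDITION & SPEC =====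
-- Pre_ excludes only the empty list, on which A's max(food_times) raises ValueError.
def Pre_solution (food_times : List Int) (k : Int) : Prop := food_times ≠ []
instance (food_times : List Int) (k : Int) : Decidable (Pre_solution food_times k) := by unfold Pre_solution; infer_instance
def pvWitness_solution : List Int × Int := ([3, 1, 2], 5)

-- On inputs with at least two foods and k < Σ min(x,-1) — reachable only with negative k or
-- negative food times — A's binary search clamps the round counter at -1 and always returns 1,
-- while B returns the index of the food at the true stopping position; B's uniform rule is the
-- intended extension (the region is empty on ordinary inputs with positive foods and 0 ≤ k).
def D_solution (food_times : List Int) (k : Int) : Prop :=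
  2 ≤ food_times.length ∧ k < (food_times.map (fun x => min x (-1))).sum
instance (food_times : List Int) (k : Int) : Decidable (D_solution food_times k) := by unfold D_solution; infer_instance

def Spec_solution (food_times : List Int) (k : Int) (out : Int) : Prop := ¬ D_solution food_times k → out = solution_alt food_times k
instance (food_times : List Int) (k : Int) (out : Int) : Decidable (Spec_solution food_times k out) := by unfold Spec_solution; infer_instance

def pvDiffWitness_solution : List Int × Int := ([1, 1], -3)
def pvDiffWitnessOut_solution : Int × Int := (1, 2)

-- ===== CLAIM (what is proved, stated in full; the proofs are below) =====
def Claim_unchanged_solution : Prop := ∀ (food_times : List Int) (k : Int), Dom_solution food_times k → Pre_solution food_times k → Spec_solution food_times k (solution food_times k)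
def Claim_changed_solution : Prop := Dom_solution (pvDiffWitness_solution.1) (pvDiffWitness_solution.2) ∧ Pre_solution (pvDiffWitness_solution.1) (pvDiffWitness_solution.2) ∧ D_solution (pvDiffWitness_solution.1) (pvDiffWitness_solution.2) ∧ solution (pvDiffWitness_solution.1) (pvDiffWitness_solution.2) = pvDiffWitnessOut_solution.1 ∧ solution_alt (pvDiffWitness_solution.1) (pvDiffWitness_solution.2) = pvDiffWitnessOut_solution.2 ∧ pvDiffWitnessOut_solution.1 ≠ pvDiffWitnessOut_solution.2

-- ===== LEMMAS AND PROOFS =====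

-- the mathematical "amount eaten after m full rounds": Σ min(x, m)
def fEat (ft : List Int) (m : Int) : Int := (ft.map (fun x => min x m)).sum

theorem eatSum_go (ft : List Int) (m a : Int) :
    ft.foldl (fun left food => if food ≤ m then left + food else left + m) a = a + fEat ft m := by
  induction ft generalizing a with
  | nil => simp [fEat]
  | cons x xs ih =>
    simp only [List.foldl, fEat, List.map, List.sum_cons]
    rw [ih]
    rcases le_or_gt x m with h | h
    · simp [if_pos h, min_eq_left h, fEat]; ring
    · rw [if_neg (not_le.mpr h), min_eq_right h.le]; simp [fEat]; ring

theorem eatSum_eq (ft : List Int) (m : Int) : eatSum ft m = fEat ft m := by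
  simpa using eatSum_go ft m 0

theorem fEat_mono (ft : List Int) {m m' : Int} (h : m ≤ m') : fEat ft m ≤ fEat ft m' := by
  unfold fEat
  apply List.sum_le_sum
  intro x _
  exact min_le_min le_rfl h

theorem fEat_strict (ft : List Int) {x m m' : Int} (hx : x ∈ ft) (hm : m < x) (h : m < m') :
    fEat ft m < fEat ft m' := by
  induction ft with
  | nil => cases hx
  | cons y ys ih =>
    have hcons : ∀ n, fEat (y :: ys) n = min y n + fEat ys n := by
      intro n; simp [fEat]
    rw [hcons, hcons]
    rcases List.mem_cons.mp hx with rfl | hx'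
    · have h1 : min x m < min x m' := by omega
      have h2 : fEat ys m ≤ fEat ys m' := fEat_mono ys h.le
      omega
    · have h1 : min y m ≤ min y m' := min_le_min le_rfl h.le
      have h2 := ih hx'
      omega

-- if fEat m = fEat m' with m < m', no element exceeds m
theorem fEat_eq_no_gt (ft : List Int) {m m' : Int} (hlt : m < m') (heq : fEat ft m = fEat ft m')
    {x : Int} (hx : x ∈ ft) : ¬ m < x := fun hgt => absurd heq (ne_of_lt (fEat_strict ft hx hgt hlt))

theorem fEat_le_sum (ft : List Int) (m : Int) : fEat ft m ≤ ft.sum := by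
  induction ft with
  | nil => simp [fEat]
  | cons x xs ih =>
    simp only [fEat, List.map, List.sum_cons] at *
    have : min x m ≤ x := min_le_left _ _
    omega

theorem fEat_perm (ft l : List Int) (h : ft.Perm l) (m : Int) : fEat ft m = fEat l m :=
  List.Perm.sum_eq (h.map _)

theorem fEat_append (l₁ l₂ : List Int) (m : Int) :
    fEat (l₁ ++ l₂) m = fEat l₁ m + fEat l₂ m := by
  simp [fEat]

theorem fEat_all_le (l : List Int) (m : Int) (h : ∀ x ∈ l, x ≤ m) : fEat l m = l.sum := by
  induction l with
  | nil => rfl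
  | cons x xs ih =>
    have hx := h x List.mem_cons_self
    have := ih (fun y hy => h y (List.mem_cons_of_mem x hy))
    simp only [fEat, List.map, List.sum_cons] at *
    rw [min_eq_left hx]; omega

theorem fEat_all_ge (l : List Int) (m : Int) (h : ∀ x ∈ l, m ≤ x) : fEat l m = m * l.length := by
  induction l with
  | nil => simp [fEat]
  | cons x xs ih =>
    have hx := h x List.mem_cons_self
    have := ih (fun y hy => h y (List.mem_cons_of_mem x hy))
    simp only [fEat, List.map, List.sum_cons, List.length_cons] at *
    rw [min_eq_right hx, this]
    push_cast
    ring

-- the affine value of fEat between a consumed prefix and a pending suffix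
theorem fEat_split (pre rest : List Int) (m : Int)
    (h₁ : ∀ x ∈ pre, x ≤ m) (h₂ : ∀ x ∈ rest, m ≤ x) :
    fEat (pre ++ rest) m = pre.sum + m * rest.length := by
  rw [fEat_append, fEat_all_le pre m h₁, fEat_all_ge rest m h₂]

-- the set of round values r both algorithms may end with
def Qr (ft : List Int) (k mx r : Int) : Prop :=
  (0 ≤ r ∧ r ≤ mx ∧ fEat ft r = k) ∨
  ((r = -1 ∨ fEat ft r < k) ∧ (r = mx ∨ fEat ft (r + 1) > k) ∧ -1 ≤ r ∧ r ≤ mx)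

-- A's final scan, rephrased over the remaining budget (bridge target for both sides)
def scanB (r : Int) : List Int → Int → Int → Int
  | [], _, _ => -1
  | x :: xs, need, i =>
    if x > r then (if need = 0 then i + 1 else scanB r xs (need - 1) (i + 1))
    else scanB r xs need (i + 1)

-- scanB returns -1 when nothing exceeds r
theorem scanB_none (ft : List Int) (r : Int) (h : ∀ x ∈ ft, ¬ r < x) :
    ∀ need i, scanB r ft need i = -1 := by
  induction ft with
  | nil => intro need i; rfl
  | cons x xs ih =>
    intro need i
    have hx := h x List.mem_cons_self
    simp only [scanB, if_neg (by omega : ¬ x > r)]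
    exact ih (fun y hy => h y (List.mem_cons_of_mem x hy)) need (i + 1)

-- the canonical answer at round level r
def ansB (ft : List Int) (k r : Int) : Int :=
  if fEat ft r > k then 1 else scanB r ft (k - fEat ft r) 0

-- answer independence (ordered half)
theorem ansB_indep_le (ft : List Int) (k mx : Int) {r r' : Int} (hle : r ≤ r')
    (h : Qr ft k mx r) (h' : Qr ft k mx r') : ansB ft k r = ansB ft k r' := by
  rcases eq_or_lt_of_le hle with rfl | hlt
  · rfl
  cases h with
  | inl h1 =>
    obtain ⟨hr0, hrm, hfk⟩ := h1
    cases h' with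
    | inl h2 =>
      obtain ⟨hr0', hrm', hfk'⟩ := h2
      have heq : fEat ft r = fEat ft r' := by omega
      have hno : ∀ x ∈ ft, ¬ r < x := fun x hx => fEat_eq_no_gt ft hlt heq hx
      have hno' : ∀ x ∈ ft, ¬ r' < x := fun x hx hgt => hno x hx (hlt.trans hgt)
      unfold ansB
      rw [hfk, hfk', if_neg (lt_irrefl k), if_neg (lt_irrefl k),
        scanB_none ft r hno, scanB_none ft r' hno']
    | inr h2 =>
      obtain ⟨ha, hb, hc, hd⟩ := h2
      have hm : fEat ft r ≤ fEat ft r' := fEat_mono ft hle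
      rcases ha with rfl | ha <;> omega
  | inr h1 =>
    obtain ⟨ha, hb, hc, hd⟩ := h1
    exfalso
    cases h' with
    | inl h2 =>
      obtain ⟨hr0', hrm', hfk'⟩ := h2
      rcases hb with rfl | hb
      · omega
      · have : fEat ft (r + 1) ≤ fEat ft r' := fEat_mono ft (by omega)
        omega
    | inr h2 =>
      obtain ⟨ha', hb', hc', hd'⟩ := h2
      rcases hb with rfl | hb
      · omega
      · have : fEat ft (r + 1) ≤ fEat ft r' := fEat_mono ft (by omega)
        rcases ha' with rfl | ha' <;> omega

-- answer independence: any two Qr values give the same answer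
theorem ansB_indep (ft : List Int) (k mx : Int) {r r' : Int}
    (h : Qr ft k mx r) (h' : Qr ft k mx r') : ansB ft k r = ansB ft k r' := by
  rcases le_total r r' with hle | hle
  · exact ansB_indep_le ft k mx hle h h'
  · exact (ansB_indep_le ft k mx hle h' h).symm

-- scanA = scanB bridge
theorem scanA_eq_scanB (k r : Int) (ft : List Int) :
    ∀ lt i, lt ≤ k → scanA k r ft lt i = scanB r ft (k - lt) i := by
  induction ft with
  | nil => intro lt i _; rfl
  | cons x xs ih =>
    intro lt i hlt
    by_cases hx : x > r
    · by_cases he : lt + 1 > k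
      · have h0 : k - lt = 0 := by omega
        simp only [scanA, scanB, if_pos hx, if_pos he, if_pos h0]
      · have h0 : ¬ (k - lt = 0) := by omega
        simp only [scanA, scanB, if_pos hx, if_neg he, if_neg h0]
        rw [ih (lt + 1) (i + 1) (by omega)]
        congr 1; omega
    · simp only [scanA, scanB, if_neg hx, if_neg (by omega : ¬ lt > k)]
      exact ih lt (i + 1) hlt

theorem scanA_of_gt (k r : Int) (x : Int) (xs : List Int) (lt i : Int) (h : lt > k) :
    scanA k r (x :: xs) lt i = i + 1 := by
  simp only [scanA]
  split_ifs with h1 h2 <;> first | rfl | omega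

-- A's binary search lands in Qr
theorem bsearchA_Qr (ft : List Int) (k mx : Int) :
    ∀ lo hi, 0 ≤ lo → hi ≤ mx → (lo = 0 ∨ fEat ft (lo - 1) < k) → (hi = mx ∨ fEat ft (hi + 1) > k) →
    lo ≤ hi + 1 → Qr ft k mx (bsearchA ft k lo hi) := by
  intro lo hi
  fun_induction bsearchA ft k lo hi with
  | case1 lo hi h =>
    intro h0 h1 h2 h3 h4
    right
    refine ⟨?_, ?_, by omega, by omega⟩
    · rcases h2 with h2 | h2
      · left; omega
      · right; have : lo - 1 = hi := by omega
        rwa [this] at h2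
    · exact h3
  | case2 lo hi h mid left hk =>
    intro h0 h1 h2 h3 h4
    have hb := PySem.Int.floordiv_two_mid_bounds (le_of_not_gt h)
    left
    refine ⟨by omega, by omega, ?_⟩
    rw [← eatSum_eq]; exact hk
  | case3 lo hi h mid left hk hlt ih =>
    intro h0 h1 h2 h3 h4
    have hb := PySem.Int.floordiv_two_mid_bounds (le_of_not_gt h)
    refine ih (by omega) h1 ?_ h3 (by omega)
    right
    have : mid + 1 - 1 = mid := by omega
    rw [this, ← eatSum_eq]; exact hlt
  | case4 lo hi h mid left hk hlt ih =>
    intro h0 h1 h2 h3 h4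
    have hb := PySem.Int.floordiv_two_mid_bounds (le_of_not_gt h)
    refine ih h0 (by omega) h2 ?_ (by omega)
    right
    have : mid - 1 + 1 = mid := by omega
    rw [this, ← eatSum_eq]; omega

-- A expressed through ansB
theorem solution_eq_ansB (ft : List Int) (k : Int) (hne : ft ≠ []) (mx : Int)
    (hmx : PySem.List.max? ft (fun x => x) = some mx) :
    solution ft k = ansB ft k (bsearchA ft k 0 mx) := by
  have hlt := eatSum_eq ft (bsearchA ft k 0 mx)
  unfold solution ansB
  rw [hmx]
  simp only [Option.getD_some]
  rw [hlt]
  by_cases hgt : fEat ft (bsearchA ft k 0 mx) > k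
  · rw [if_pos hgt]
    cases ft with
    | nil => exact absurd rfl hne
    | cons x xs => exact scanA_of_gt _ _ _ _ _ _ hgt
  · rw [if_neg hgt, scanA_eq_scanB _ _ _ _ _ (by omega)]

-- A returns 1 whenever the budget is exhausted before round -1
theorem solution_eq_one (ft : List Int) (k : Int) (hne : ft ≠ []) (mx : Int)
    (hmx : PySem.List.max? ft (fun x => x) = some mx) (hk : k < fEat ft (-1)) :
    solution ft k = 1 := by
  rw [solution_eq_ansB ft k hne mx hmx]
  have hmax : ∀ x ∈ ft, x ≤ mx := fun x hx => PySem.List.max?_isMax hmx x hx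
  by_cases hneg : mx < 0
  · have hA : bsearchA ft k 0 mx = mx := by
      unfold bsearchA
      rw [dif_pos (by omega : (0 : Int) > mx)]
    rw [hA]
    have hsum : fEat ft mx = ft.sum := fEat_all_le ft mx (fun x hx => le_rfl.trans (hmax x hx))
    have hsum' : fEat ft (-1) = ft.sum := fEat_all_le ft (-1) (fun x hx => by have := hmax x hx; omega)
    unfold ansB
    rw [if_pos (by omega)]
  · have hQ := bsearchA_Qr ft k mx 0 mx le_rfl le_rfl (Or.inl rfl) (Or.inl rfl) (by omega)
    have h0 : k < fEat ft 0 := lt_of_lt_of_le hk (fEat_mono ft (by omega))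
    have hr : bsearchA ft k 0 mx = -1 := by
      rcases hQ with ⟨hr0, _, hfk⟩ | ⟨ha, _, hc, _⟩
      · have := fEat_mono ft hr0
        omega
      · rcases ha with h | h
        · exact h
        · by_cases hcase : bsearchA ft k 0 mx = -1
          · exact hcase
          · have : fEat ft 0 ≤ fEat ft (bsearchA ft k 0 mx) := fEat_mono ft (by omega)
            omega
    rw [hr]
    unfold ansB
    rw [if_pos (by omega)]

-- all-equal lists sum to value × length
theorem sum_const_of_eq (t : Int) (l : List Int) (h : ∀ x ∈ l, x = t) :
    l.sum = t * l.length := by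
  induction l with
  | nil => simp
  | cons x xs ih =>
    have hx := h x List.mem_cons_self
    have := ih (fun y hy => h y (List.mem_cons_of_mem x hy))
    simp only [List.sum_cons, List.length_cons] at *
    rw [hx, this]
    push_cast
    ring

-- on a sorted list whose head is its minimum t, dropping the leading t's is filtering by > t
theorem dropWhile_eq_filter_gt (t : Int) : ∀ l : List Int, l.Pairwise (fun a b : Int => a ≤ b) →
    (∀ x ∈ l, t ≤ x) → l.dropWhile (fun x => decide (x = t)) = l.filter (fun x => decide (t < x)) := by
  intro l
  induction l with
  | nil => intro _ _; rfl
  | cons y ys ih =>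
    intro hpair hge
    by_cases hy : y = t
    · subst hy
      rw [List.dropWhile_cons_of_pos (by simp), List.filter_cons_of_neg (by simp)]
      exact ih (List.pairwise_cons.mp hpair).2 (fun x hx => hge x (List.mem_cons_of_mem y hx))
    · have hyt : t < y := lt_of_le_of_ne (hge y List.mem_cons_self) (Ne.symm hy)
      rw [List.dropWhile_cons_of_neg (by simpa using hy), List.filter_cons_of_pos (by simpa using hyt)]
      rw [List.filter_eq_self.mpr]
      intro x hx
      have := (List.pairwise_cons.mp hpair).1 x hx
      simp only [decide_eq_true_eq]
      omega

-- the sweep's invariant-carrying correctness lemma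
theorem sweepB_facts (ft : List Int) (k : Int) (hne : ft ≠ []) :
    ∀ rest prev left pre,
    PySem.List.sorted ft (fun x => x) = pre ++ rest →
    left = k - pre.sum - prev * rest.length →
    (∀ x ∈ pre, x ≤ prev) →
    ((pre = [] ∧ prev = 0) ∨ (0 ≤ left ∧ ∀ x ∈ rest, prev < x)) →
    (match sweepB k rest prev left with
     | none => ft.sum ≤ k
     | some (r, pos) => 0 ≤ pos ∧ fEat ft r = k - pos ∧ k < fEat ft (r + 1)
         ∧ pos < ((ft.filter (fun x => decide (r < x))).length : Int)
         ∧ ∃ u ∈ ft, r < u) := by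
  intro rest prev left
  fun_induction sweepB k rest prev left with
  | case1 prev left =>
    intro pre hsplit hleft hpre hbase
    show ft.sum ≤ k
    have hperm : ft.Perm pre := by
      have := PySem.List.sorted_perm ft (fun x => x) false
      rw [hsplit, List.append_nil] at this
      exact this.symm
    rcases hbase with ⟨hpe, _⟩ | ⟨hl, _⟩
    · exfalso
      apply hne
      have : ft.Perm [] := by rw [hpe] at hperm; exact hperm
      exact List.Perm.eq_nil this
    · have hsum : ft.sum = pre.sum := hperm.sum_eq
      simp only [List.length_nil] at hleft
      omega
  | case2 t rest' prev left cnt spend hcond ih =>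
    intro pre hsplit hleft hpre hbase
    have hcnt : cnt = ((t :: rest').length : Int) := rfl
    have hspend : spend = (t - prev) * cnt := rfl
    have hpairAll : (PySem.List.sorted ft (fun x => x)).Pairwise (fun a b : Int => a ≤ b) :=
      PySem.List.sorted_pairwise ft (fun x => x)
    have hpair : (t :: rest').Pairwise (fun a b : Int => a ≤ b) := by
      rw [hsplit] at hpairAll
      exact (List.pairwise_append.mp hpairAll).2.1
    have hge : ∀ x ∈ t :: rest', t ≤ x := by
      intro x hx
      rcases List.mem_cons.mp hx with rfl | hx'
      · exact le_rfl
      · exact (List.pairwise_cons.mp hpair).1 x hx'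
    have hprevt : ∀ x ∈ pre, x ≤ t := by
      rcases hbase with ⟨hpe, _⟩ | ⟨_, hrg⟩
      · intro x hx; rw [hpe] at hx; cases hx
      · intro x hx
        have h1 := hpre x hx
        have h2 := hrg t List.mem_cons_self
        omega
    have hdrop : (t :: rest').dropWhile (fun x => decide (x = t)) =
        (t :: rest').filter (fun x => decide (t < x)) :=
      dropWhile_eq_filter_gt t (t :: rest') hpair hge
    have htake : ∀ x ∈ (t :: rest').takeWhile (fun x => decide (x = t)), x = t := by
      intro x hx
      simpa using List.mem_takeWhile_imp hx
    -- apply IH at pre' = pre ++ takeWhile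
    have hsplit' : PySem.List.sorted ft (fun x => x) =
        (pre ++ (t :: rest').takeWhile (fun x => decide (x = t))) ++
          (t :: rest').dropWhile (fun x => decide (x = t)) := by
      rw [List.append_assoc, List.takeWhile_append_dropWhile]
      exact hsplit
    have hlen : ((t :: rest').takeWhile (fun x => decide (x = t))).length +
        ((t :: rest').dropWhile (fun x => decide (x = t))).length = (t :: rest').length := by
      rw [← List.length_append, List.takeWhile_append_dropWhile]
    have hleft' : left - spend =
        k - (pre ++ (t :: rest').takeWhile (fun x => decide (x = t))).sum -
          t * ((t :: rest').dropWhile (fun x => decide (x = t))).length := by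
      have hlsum : (((t :: rest').length : Int)) =
          (((t :: rest').takeWhile (fun x => decide (x = t))).length : Int) +
          (((t :: rest').dropWhile (fun x => decide (x = t))).length : Int) := by
        exact_mod_cast hlen.symm
      rw [List.sum_append, sum_const_of_eq t _ htake, hleft, hspend, hcnt, hlsum]
      ring
    have hpre' : ∀ x ∈ pre ++ (t :: rest').takeWhile (fun x => decide (x = t)), x ≤ t := by
      intro x hx
      rcases List.mem_append.mp hx with hx | hx
      · exact hprevt x hx
      · exact le_of_eq (htake x hx)
    have hbase' : ((pre ++ (t :: rest').takeWhile (fun x => decide (x = t)) = []) ∧ t = 0) ∨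
        (0 ≤ left - spend ∧ ∀ x ∈ (t :: rest').dropWhile (fun x => decide (x = t)), t < x) := by
      right
      constructor
      · omega
      · intro x hx
        rw [hdrop] at hx
        simpa using (List.mem_filter.mp hx).2
    exact ih _ hsplit' hleft' hpre' hbase'
  | case3 t rest' prev left cnt spend hcond =>
    intro pre hsplit hleft hpre hbase
    show 0 ≤ PySem.Int.mod left cnt ∧
        fEat ft (prev + PySem.Int.floordiv left cnt) = k - PySem.Int.mod left cnt ∧
        k < fEat ft (prev + PySem.Int.floordiv left cnt + 1) ∧
        PySem.Int.mod left cnt <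
          ((ft.filter (fun x => decide (prev + PySem.Int.floordiv left cnt < x))).length : Int) ∧
        ∃ u ∈ ft, prev + PySem.Int.floordiv left cnt < u
    have hcnt : cnt = ((t :: rest').length : Int) := rfl
    have hspend : spend = (t - prev) * cnt := rfl
    have hcpos : (0 : Int) < cnt := by
      rw [hcnt]; simp only [List.length_cons]; positivity
    set q := PySem.Int.floordiv left cnt with hq
    set pos := PySem.Int.mod left cnt with hpos
    have hdm : q * cnt + pos = left := PySem.Int.floordiv_mul_add_mod left cnt
    have hpos0 : 0 ≤ pos := PySem.Int.mod_nonneg left hcpos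
    have hposc : pos < cnt := PySem.Int.mod_lt left hcpos
    set r := prev + q with hr
    -- q < t - prev
    have hlt : left < (t - prev) * cnt := by
      rw [hspend] at hcond; omega
    have hqlt : q < t - prev := by
      by_contra hc
      push_neg at hc
      nlinarith
    have hrt : r + 1 ≤ t := by omega
    -- list structure
    have hpairAll : (PySem.List.sorted ft (fun x => x)).Pairwise (fun a b : Int => a ≤ b) :=
      PySem.List.sorted_pairwise ft (fun x => x)
    have hpair : (t :: rest').Pairwise (fun a b : Int => a ≤ b) := by
      rw [hsplit] at hpairAll
      exact (List.pairwise_append.mp hpairAll).2.1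
    have hge : ∀ x ∈ t :: rest', t ≤ x := by
      intro x hx
      rcases List.mem_cons.mp hx with rfl | hx'
      · exact le_rfl
      · exact (List.pairwise_cons.mp hpair).1 x hx'
    have hperm : ft.Perm (pre ++ t :: rest') := by
      have := PySem.List.sorted_perm ft (fun x => x) false
      rw [hsplit] at this
      exact this.symm
    have hpre_r : ∀ x ∈ pre, x ≤ r := by
      rcases hbase with ⟨hpe, _⟩ | ⟨hl, _⟩
      · intro x hx; rw [hpe] at hx; cases hx
      · intro x hx
        have hq0 : 0 ≤ q := by
          rw [hq, PySem.Int.floordiv_eq_ediv_of_pos hcpos]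
          exact Int.ediv_nonneg hl (by omega)
        have := hpre x hx
        omega
    have hfr : fEat ft r = k - pos := by
      rw [fEat_perm ft _ hperm,
        fEat_split pre (t :: rest') r hpre_r (fun x hx => le_trans (by omega) (hge x hx))]
      rw [← hcnt]
      have : (pre.sum + prev * cnt) = k - left := by
        rw [hleft, ← hcnt]; ring
      nlinarith [this, hdm]
    have hfr1 : fEat ft (r + 1) = k - pos + cnt := by
      rw [fEat_perm ft _ hperm,
        fEat_split pre (t :: rest') (r + 1) (fun x hx => by have := hpre_r x hx; omega)
          (fun x hx => le_trans hrt (hge x hx))]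
      rw [← hcnt]
      have : (pre.sum + prev * cnt) = k - left := by
        rw [hleft, ← hcnt]; ring
      nlinarith [this, hdm]
    refine ⟨hpos0, hfr, by omega, ?_, ⟨t, hperm.mem_iff.mpr (by simp), by omega⟩⟩
    -- survivors are at least the whole remaining suffix
    have hfilt : (ft.filter (fun x => decide (r < x))).length =
        ((pre ++ t :: rest').filter (fun x => decide (r < x))).length :=
      (hperm.filter _).length_eq
    have hsuffix : (t :: rest').filter (fun x => decide (r < x)) = t :: rest' := by
      apply List.filter_eq_self.mpr
      intro x hx
      have := hge x hx
      simp only [decide_eq_true_eq]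
      omega
    rw [hfilt, List.filter_append, List.length_append, hsuffix]
    have : pos < ((t :: rest').length : Int) := by rw [← hcnt]; omega
    push_cast at *
    omega

-- scanB computed through the survivors list
theorem scanB_eq_surv (r : Int) :
    ∀ (l : List Int) (need s : Int), 0 ≤ need →
    scanB r l need s =
      (match PySem.List.pyGet?
          (((PySem.List.enumerate l s).filter (fun p => decide (r < p.2))).map (fun p => p.1)) need with
       | some j => j + 1
       | none => -1) := by
  intro l
  induction l with
  | nil =>
    intro need s h
    simp [scanB, PySem.List.enumerate_nil, PySem.List.pyGet?]
  | cons x xs ih =>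
    intro need s h
    rw [PySem.List.enumerate_cons]
    by_cases hx : r < x
    · rw [List.filter_cons_of_pos (by simpa using hx), List.map_cons]
      by_cases hneed : need = 0
      · subst hneed
        simp [scanB, hx]
      · have h1 : (0 : Int) ≤ need - 1 := by omega
        have hget : PySem.List.pyGet?
            (s :: ((PySem.List.enumerate xs (s + 1)).filter (fun p => decide (r < p.2))).map (fun p => p.1)) need =
            PySem.List.pyGet?
            (((PySem.List.enumerate xs (s + 1)).filter (fun p => decide (r < p.2))).map (fun p => p.1)) (need - 1) := by
          rw [PySem.List.pyGet?_of_nonneg _ h, PySem.List.pyGet?_of_nonneg _ h1]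
          have ht : need.toNat = (need - 1).toNat + 1 := by omega
          rw [ht, List.getElem?_cons_succ]
        rw [hget]
        simp only [scanB, if_pos (by omega : x > r), if_neg hneed]
        exact ih (need - 1) (s + 1) h1
    · rw [List.filter_cons_of_neg (by simpa using hx)]
      simp only [scanB, if_neg (by omega : ¬ x > r)]
      exact ih need (s + 1) h

-- the survivors list counts exactly the foods above r
theorem surv_length (r : Int) :
    ∀ (l : List Int) (s : Int),
    (((PySem.List.enumerate l s).filter (fun p => decide (r < p.2))).map (fun p => p.1)).length =
      (l.filter (fun x => decide (r < x))).length := by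
  intro l
  induction l with
  | nil => intro s; simp [PySem.List.enumerate_nil]
  | cons x xs ih =>
    intro s
    rw [PySem.List.enumerate_cons]
    by_cases hx : r < x
    · rw [List.filter_cons_of_pos (by simpa using hx), List.filter_cons_of_pos (by simpa using hx)]
      simp only [List.map_cons, List.length_cons]
      rw [ih]
    · rw [List.filter_cons_of_neg (by simpa using hx), List.filter_cons_of_neg (by simpa using hx)]
      exact ih (s + 1)

-- ===== VERDICT proofs =====

theorem solution_unchanged_main (ft : List Int) (k : Int) (hne : ft ≠ [])
    (hnD : ¬ D_solution ft k) : solution ft k = solution_alt ft k := by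
  obtain ⟨mx, hmx⟩ : ∃ mx, PySem.List.max? ft (fun x => x) = some mx := by
    cases hh : PySem.List.max? ft (fun x => x) with
    | none => exact absurd ((PySem.List.max?_eq_none_iff ft (fun x => x)).mp hh) hne
    | some m => exact ⟨m, rfl⟩
  have hmem : mx ∈ ft := PySem.List.max?_mem hmx
  have hmax : ∀ x ∈ ft, x ≤ mx := fun x hx => PySem.List.max?_isMax hmx x hx
  by_cases hk : k < fEat ft (-1)
  · -- outside D_ this forces a single-element list; both sides return 1
    have hn1 : ft.length = 1 := by
      unfold D_solution at hnD
      push_neg at hnD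
      have hlen : ft.length < 2 := by
        by_contra hc
        push_neg at hc
        have := hnD (by omega)
        unfold fEat at hk
        omega
      cases ft with
      | nil => exact absurd rfl hne
      | cons a l => simp at hlen ⊢; omega
    obtain ⟨a, rfl⟩ : ∃ a, ft = [a] := by
      cases ft with
      | nil => exact absurd rfl hne
      | cons a l =>
        cases l with
        | nil => exact ⟨a, rfl⟩
        | cons b l' => simp at hn1
    have hka : k < min a (-1) := by
      unfold fEat at hk
      simp at hk
      omega
    rw [solution_eq_one [a] k hne mx hmx hk]
    -- B on a singleton: the single level is rejected and food 0 survives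
    show (1 : Int) = solution_alt [a] k
    unfold solution_alt
    have hsort : PySem.List.sorted [a] (fun x => x) = [a] :=
      PySem.List.sorted_eq_self_of_pairwise _ _ (by simp)
    rw [hsort]
    have hrej : ¬ ((a - 0) * ((([a] : List Int).length : Int)) ≤ k) := by
      simp only [List.length_cons, List.length_nil]
      push_cast
      omega
    rw [sweepB]
    simp only [hrej, if_false]
    have hd1 : PySem.Int.floordiv k 1 = k := by
      rw [PySem.Int.floordiv_eq_ediv_of_pos (by omega)]; omega
    have hm1 : PySem.Int.mod k 1 = 0 := by
      rw [PySem.Int.mod_eq_emod_of_pos (by omega)]; omega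
    simp only [List.length_cons, List.length_nil]
    norm_num [hd1, hm1]
    have hdec : (decide (k < (((0:Int), a)).2)) = true := by simp; omega
    simp [List.filter, hdec]
  · -- the main regime: both sides equal ansB at a Qr point
    push_neg at hk
    rw [solution_eq_ansB ft k hne mx hmx]
    have hsw := sweepB_facts ft k hne (PySem.List.sorted ft (fun x => x)) 0 k []
      (by simp) (by simp) (by simp) (Or.inl ⟨rfl, rfl⟩)
    unfold solution_alt
    cases hres : sweepB k (PySem.List.sorted ft (fun x => x)) 0 k with
    | none =>
      rw [hres] at hsw
      have hsum : ft.sum ≤ k := hsw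
      -- A's answer is -1 too
      have hfmx : fEat ft mx = ft.sum := fEat_all_le ft mx hmax
      have hnone : ∀ r', Qr ft k mx r' → ansB ft k r' = -1 := by
        intro r' hQ
        have hle : fEat ft r' ≤ ft.sum := fEat_le_sum ft r'
        have hrmx : r' = mx ∨ fEat ft r' = k ∧ r' < mx ∨ False := by
          rcases hQ with ⟨h0, h1, h2⟩ | ⟨ha, hb, hc, hd⟩
          · rcases eq_or_lt_of_le h1 with rfl | hlt
            · left; rfl
            · right; left; exact ⟨h2, hlt⟩
          · rcases hb with rfl | hb
            · left; rfl
            · have := fEat_le_sum ft (r' + 1)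
              omega
        rcases hrmx with rfl | ⟨hfk, hlt⟩ | hfalse
        · unfold ansB
          rw [if_neg (by omega)]
          exact scanB_none ft r' (fun x hx => by have := hmax x hx; omega) _ _
        · exfalso
          have := fEat_strict ft hmem hlt hlt
          omega
        · exact hfalse.elim
      by_cases hmxneg : mx < 0
      · have hA : bsearchA ft k 0 mx = mx := by
          unfold bsearchA
          rw [dif_pos (by omega : (0 : Int) > mx)]
        rw [hA]
        unfold ansB
        rw [if_neg (by omega)]
        exact scanB_none ft mx (fun x hx => by have := hmax x hx; omega) _ _
      · exact hnone _ (bsearchA_Qr ft k mx 0 mx le_rfl le_rfl (Or.inl rfl) (Or.inl rfl) (by omega))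
    | some rp =>
      obtain ⟨r, pos⟩ := rp
      rw [hres] at hsw
      obtain ⟨hpos0, hfr, hfr1, hposlen, u, hu, hru⟩ := hsw
      have hmx0 : 0 ≤ mx := by
        -- if every element were ≤ -1, fEat (r+1) ≤ fEat (-1) ≤ k would contradict k < fEat (r+1)
        by_contra hc
        push_neg at hc
        have hsum : fEat ft (-1) = ft.sum := fEat_all_le ft (-1) (fun x hx => by have := hmax x hx; omega)
        have := fEat_le_sum ft (r + 1)
        omega
      have hr1 : -1 ≤ r := by
        by_contra hc
        push_neg at hc
        have : fEat ft (r + 1) ≤ fEat ft (-1) := fEat_mono ft (by omega)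
        omega
      have hrmx : r ≤ mx := by
        have := hmax u hu
        omega
      have hQB : Qr ft k mx r := by
        by_cases hp : pos = 0
        · subst hp
          rcases eq_or_lt_of_le hr1 with h | h
          · exact Or.inr ⟨Or.inl h.symm, Or.inr (by omega), by omega, hrmx⟩
          · exact Or.inl ⟨by omega, hrmx, by omega⟩
        · exact Or.inr ⟨Or.inr (by omega), Or.inr (by omega), hr1, hrmx⟩
      have hQA := bsearchA_Qr ft k mx 0 mx le_rfl le_rfl (Or.inl rfl) (Or.inl rfl) (by omega)
      rw [ansB_indep ft k mx hQA hQB]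
      unfold ansB
      rw [if_neg (by omega), hfr]
      have : k - (k - pos) = pos := by omega
      rw [this]
      rw [scanB_eq_surv r ft pos 0 hpos0]
      have hlen : pos <
          (((((PySem.List.enumerate ft 0).filter (fun p => decide (r < p.2))).map (fun p => p.1)).length : Int)) := by
        rw [surv_length r ft 0]
        exact hposlen
      obtain ⟨j, hj⟩ : ∃ j, PySem.List.pyGet?
          (((PySem.List.enumerate ft 0).filter (fun p => decide (r < p.2))).map (fun p => p.1)) pos = some j := by
        cases hg : PySem.List.pyGet?
            (((PySem.List.enumerate ft 0).filter (fun p => decide (r < p.2))).map (fun p => p.1)) pos with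
        | none =>
          exfalso
          have := (PySem.List.pyGet?_eq_none_iff _ _).mp hg
          unfold PySem.Raise.InRange at this
          push_neg at this
          omega
        | some j => exact ⟨j, rfl⟩
      simp [hj]

-- ===== VERDICT (by name: the statement is the Claim_ definition above) =====
theorem solution_spec : Claim_unchanged_solution := by
  unfold Claim_unchanged_solution
  intro ft k _ hpre
  unfold Spec_solution
  intro hnD
  exact solution_unchanged_main ft k hpre hnD

theorem solution_changed : Claim_changed_solution := by
  unfold Claim_changed_solution
  refine ⟨by decide, by decide, by decide, ?_, ?_, by decide⟩
  · exact solution_eq_one [1, 1] (-3) (by decide) 1 (by decide) (by decide)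
  · show solution_alt [1, 1] (-3) = 2
    have hsw : sweepB (-3) [1, 1] 0 (-3) = some (-2, 1) := by
      rw [sweepB]; decide
    unfold solution_alt
    rw [show PySem.List.sorted [(1 : Int), 1] (fun x => x) = [1, 1] from by decide, hsw]
    decide
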